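-- pv_equiv track=rewrite | github.com/arnoldlambisia/Epiinsights_wave8_Kilifi | scripts/pairwise_nucleotide_difference_v1.0.py | pairwise_diff
-- ===== SOURCE A (Python) =====
-- def pairwise_diff(seq1, seq2):
--     valid_bases = {"A", "C", "T", "G"}
--     differences = 0
--     valid_sites = 0
--
--     for nt1, nt2 in zip(seq1, seq2):
--         if nt1 in valid_bases and nt2 in valid_bases:
--             valid_sites += 1
--             if nt1 != nt2:
--                 differences += 1
--
--     return differences, valid_sites
-- ===== SOURCE B (Python) =====
-- def pairwise_diff(seq1, seq2):
--     valid_bases = {"A", "C", "T", "G"}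
--     counts = {}
--     for pair in zip(seq1, seq2):
--         counts[pair] = counts.get(pair, 0) + 1
--     valid_sites = sum(n for (nt1, nt2), n in counts.items()
--                       if nt1 in valid_bases and nt2 in valid_bases)
--     matches = sum(counts.get((b, b), 0) for b in "ACGT")
--     return valid_sites - matches, valid_sites
-- ===== Notes on version B (the rewrite author's own statement) =====
-- stated objective: alternative
-- what changed: B aggregates the zipped pairs into a frequency table in one pass, then obtains valid_sites as a weighted sum over the table's valid entries and differences by subtracting the table's diagonal ((b,b)) counts from valid_sites, with no per-site mismatch test.
import Mathlib
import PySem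

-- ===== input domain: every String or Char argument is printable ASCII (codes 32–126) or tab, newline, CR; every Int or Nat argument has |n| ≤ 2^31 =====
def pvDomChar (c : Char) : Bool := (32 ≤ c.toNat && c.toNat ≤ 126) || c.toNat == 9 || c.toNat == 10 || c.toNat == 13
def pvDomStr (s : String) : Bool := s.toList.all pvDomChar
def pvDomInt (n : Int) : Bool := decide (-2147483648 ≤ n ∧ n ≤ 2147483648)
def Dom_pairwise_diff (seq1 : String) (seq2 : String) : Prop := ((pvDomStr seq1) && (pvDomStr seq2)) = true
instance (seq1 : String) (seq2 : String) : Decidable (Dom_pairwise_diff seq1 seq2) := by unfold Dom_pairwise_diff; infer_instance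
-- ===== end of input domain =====

-- B replaces A's per-site fused counters by a two-phase aggregation: one pass builds a frequency table
-- of the aligned pairs, then both counts are weighted sums over the table's distinct pairs (alternative decomposition, same cost).

-- ===== PORT A =====
-- A-side helper: the loop body of A (one step of the fold over zipped pairs).
def pvStepA (vb : PySem.Set Char) (st : Int × Int) (p : Char × Char) : Int × Int :=
  if p.1 ∈ vb ∧ p.2 ∈ vb then
    let valid_sites := st.2 + 1
    if p.1 ≠ p.2 then (st.1 + 1, valid_sites) else (st.1, valid_sites)
  else st

-- A's single loop over zip(seq1, seq2), maintaining (differences, valid_sites) together.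
def pairwise_diff (seq1 : String) (seq2 : String) : Int × Int :=
  let valid_bases : PySem.Set Char := PySem.Set.ofList ['A', 'C', 'T', 'G']
  let st := (List.zip seq1.toList seq2.toList).foldl (pvStepA valid_bases) (0, 0)
  (st.1, st.2)

-- ===== PORT B =====
-- B: build the counter dict of aligned pairs (counts[pair] = counts.get(pair, 0) + 1); then
-- valid_sites = sum of multiplicities of valid table entries, matches = sum of the diagonal
-- entries counts.get((b, b), 0) over "ACGT", and differences = valid_sites - matches.
def pairwise_diff_alt (seq1 : String) (seq2 : String) : Int × Int :=
  let valid_bases : PySem.Set Char := PySem.Set.ofList ['A', 'C', 'T', 'G']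
  let counts : PySem.Dict (Char × Char) Int :=
    (List.zip seq1.toList seq2.toList).foldl
      (fun d p => d.insert p (d.getD p 0 + 1)) PySem.Dict.empty
  let valid_sites : Int :=
    ((counts.items.filter
        (fun kn => decide (kn.1.1 ∈ valid_bases) && decide (kn.1.2 ∈ valid_bases))).map (·.2)).sum
  let matchCnt : Int := ("ACGT".toList.map (fun b => counts.getD (b, b) 0)).sum
  (valid_sites - matchCnt, valid_sites)

-- ===== PRECONDITION & SPEC =====
def Spec_pairwise_diff (seq1 : String) (seq2 : String) (out : Int × Int) : Prop := out = pairwise_diff_alt seq1 seq2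
instance (seq1 : String) (seq2 : String) (out : Int × Int) : Decidable (Spec_pairwise_diff seq1 seq2 out) := by unfold Spec_pairwise_diff; infer_instance

-- ===== CLAIM (what is proved, stated in full; the proofs are below) =====
def Claim_equal_pairwise_diff : Prop := ∀ (seq1 : String) (seq2 : String), Dom_pairwise_diff seq1 seq2 → Spec_pairwise_diff seq1 seq2 (pairwise_diff seq1 seq2)

-- ===== LEMMAS AND PROOFS =====

-- A's fold is the pair of 0/1-weighted sums over the zipped list.
theorem pvFoldA_eq (vb : PySem.Set Char) (l : List (Char × Char)) (d v : Int) :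
    l.foldl (pvStepA vb) (d, v)
    = (d + (l.map (fun p => if p.1 ∈ vb ∧ p.2 ∈ vb ∧ p.1 ≠ p.2 then (1 : Int) else 0)).sum,
       v + (l.map (fun p => if p.1 ∈ vb ∧ p.2 ∈ vb then (1 : Int) else 0)).sum) := by
  induction l generalizing d v with
  | nil => simp
  | cons h t ih =>
    rw [List.foldl_cons]
    by_cases hv : h.1 ∈ vb ∧ h.2 ∈ vb
    · by_cases hne : h.1 = h.2
      · rw [show pvStepA vb (d, v) h = (d, v + 1) by simp [pvStepA, hv, hne], ih]
        simp [hv, hne]; ring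
      · rw [show pvStepA vb (d, v) h = (d + 1, v + 1) by simp [pvStepA, hv, hne], ih]
        simp [hv, hne]; constructor <;> ring
    · rw [show pvStepA vb (d, v) h = (d, v) by simp [pvStepA, hv], ih]
      have h1 : ¬(h.1 ∈ vb ∧ h.2 ∈ vb ∧ h.1 ≠ h.2) := fun ⟨a, b, _⟩ => hv ⟨a, b⟩
      simp [hv, h1]

-- Summing g over a filtered list is summing the if-weighted g over the whole list.
theorem pvSum_filter {α : Type} (s : List α) (p : α → Bool) (g : α → Int) :
    ((s.filter p).map g).sum = (s.map (fun k => if p k then g k else 0)).sum := by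
  induction s with
  | nil => simp
  | cons h t ih =>
    by_cases hp : p h
    · simp [hp, ih]
    · simp [hp, ih]

-- On a nodup list containing x, the sum of the indicator-weighted f is f x.
theorem pvIndicator_sum {α : Type} [BEq α] [LawfulBEq α] (s : List α) (hnd : s.Nodup) (x : α)
    (hx : x ∈ s) (f : α → Int) :
    (s.map (fun k => if k == x then f k else 0)).sum = f x := by
  induction s with
  | nil => cases hx
  | cons h t ih =>
    simp only [List.map_cons, List.sum_cons]
    rcases List.mem_cons.mp hx with rfl | hxt
    · have hxn : x ∉ t := (List.nodup_cons.mp hnd).1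
      have hz : (t.map (fun k => if k == x then f k else 0)).sum = 0 := by
        apply List.sum_eq_zero; intro y hy
        rcases List.mem_map.mp hy with ⟨k, hk, rfl⟩
        have : k ≠ x := fun h => hxn (h ▸ hk)
        simp [this]
      simp [hz]
    · have hhx : h ≠ x := fun h' => (List.nodup_cons.mp hnd).1 (h' ▸ hxt)
      have : (h == x) = false := by simp [hhx]
      rw [this]
      simp only [Bool.false_eq_true, if_false]
      rw [ih (List.nodup_cons.mp hnd).2 hxt]
      ring

-- Multiplicity-weighted sum over any nodup superset of l's elements equals the plain sum over l.
theorem pvCount_weight {α : Type} [BEq α] [LawfulBEq α] (l : List α) (s : List α) (hnd : s.Nodup)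
    (hsub : ∀ y ∈ l, y ∈ s) (f : α → Int) :
    (s.map (fun k => (l.count k : Int) * f k)).sum = (l.map f).sum := by
  induction l with
  | nil => simp
  | cons x t ih =>
    have hxs : x ∈ s := hsub x (List.mem_cons_self)
    have hts : ∀ y ∈ t, y ∈ s := fun y hy => hsub y (List.mem_cons_of_mem _ hy)
    have hsplit : ∀ k : α, ((x :: t).count k : Int) * f k
        = (t.count k : Int) * f k + (if k == x then f k else 0) := by
      intro k
      rw [List.count_cons]
      by_cases hk : k = x
      · subst hk; simp; ring
      · have hb : (k == x) = false := by simp [hk]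
        simp [hb]
        exact Or.inl (fun h => hk h.symm)
    calc (s.map (fun k => ((x :: t).count k : Int) * f k)).sum
        = (s.map (fun k => (t.count k : Int) * f k + (if k == x then f k else 0))).sum := by
          congr 1; exact List.map_congr_left (fun k _ => hsplit k)
      _ = (s.map (fun k => (t.count k : Int) * f k)).sum
          + (s.map (fun k => if k == x then f k else 0)).sum := by
          rw [← List.sum_map_add]
      _ = (t.map f).sum + f x := by rw [ih hts, pvIndicator_sum s hnd x hxs f]
      _ = ((x :: t).map f).sum := by simp; ring

-- The sum over nodup bases of the indicator of x = (b, b) is the diagonal indicator of x.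
theorem pvDiagIndicator (bases : List Char) (hnd : bases.Nodup) (x : Char × Char) :
    (bases.map (fun b => if ((b, b) : Char × Char) == x then (1 : Int) else 0)).sum
    = if x.1 = x.2 ∧ x.1 ∈ bases then 1 else 0 := by
  by_cases he : x.1 = x.2
  · have hbeq : ∀ b : Char, (((b, b) : Char × Char) == x) = (b == x.1) := by
      intro b
      have h1 : (((b, b) : Char × Char) == x) = ((b == x.1) && (b == x.2)) := rfl
      rw [h1, ← he, Bool.and_self]
    have hmap : bases.map (fun b => if ((b, b) : Char × Char) == x then (1 : Int) else 0)
        = bases.map (fun b => if b == x.1 then (fun _ : Char => (1 : Int)) x.1 else 0) := by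
      apply List.map_congr_left; intro b _; rw [hbeq b]
    rw [hmap]
    by_cases hc : x.1 ∈ bases
    · rw [pvIndicator_sum bases hnd x.1 hc (fun _ => (1 : Int)),
        if_pos (⟨he, hc⟩ : x.1 = x.2 ∧ x.1 ∈ bases)]
    · have hz : (bases.map (fun b => if b == x.1 then (fun _ : Char => (1 : Int)) x.1 else 0)).sum = 0 := by
        apply List.sum_eq_zero; intro y hy
        rcases List.mem_map.mp hy with ⟨b, hb, rfl⟩
        have : b ≠ x.1 := fun h => hc (h ▸ hb)
        simp [this]
      rw [hz]; simp [hc]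
  · have hz : (bases.map (fun b => if ((b, b) : Char × Char) == x then (1 : Int) else 0)).sum = 0 := by
      apply List.sum_eq_zero; intro y hy
      rcases List.mem_map.mp hy with ⟨b, hb, rfl⟩
      have : ¬((b, b) : Char × Char) = x := by
        intro h; exact he (by rw [← h])
      simp [this]
    rw [hz]; simp [he]

-- The total diagonal count over nodup bases is the sum of the diagonal indicator over l.
theorem pvDiag_sum (bases : List Char) (hnd : bases.Nodup) (l : List (Char × Char)) :
    (bases.map (fun b => (l.count ((b, b) : Char × Char) : Int))).sum
    = (l.map (fun p => if p.1 = p.2 ∧ p.1 ∈ bases then (1 : Int) else 0)).sum := by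
  induction l with
  | nil => simp
  | cons x t ih =>
    have hstep : ∀ b : Char, ((x :: t).count ((b, b) : Char × Char) : Int)
        = (t.count ((b, b) : Char × Char) : Int)
          + (if ((b, b) : Char × Char) == x then (1 : Int) else 0) := by
      intro b
      by_cases hb : ((b, b) : Char × Char) = x
      · rw [List.count_cons]; simp [hb]
      · have hbf : (x == ((b, b) : Char × Char)) = false := by
          simp only [beq_eq_false_iff_ne, ne_eq]
          exact fun h => hb h.symm
        rw [List.count_cons, hbf]
        simp [hb]
    calc (bases.map (fun b => ((x :: t).count ((b, b) : Char × Char) : Int))).sum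
        = (bases.map (fun b => (t.count ((b, b) : Char × Char) : Int)
            + (if ((b, b) : Char × Char) == x then (1 : Int) else 0))).sum := by
          congr 1; exact List.map_congr_left (fun b _ => hstep b)
      _ = (bases.map (fun b => (t.count ((b, b) : Char × Char) : Int))).sum
          + (bases.map (fun b => if ((b, b) : Char × Char) == x then (1 : Int) else 0)).sum := by
          rw [← List.sum_map_add]
      _ = (t.map (fun p => if p.1 = p.2 ∧ p.1 ∈ bases then (1 : Int) else 0)).sum
          + (if x.1 = x.2 ∧ x.1 ∈ bases then (1 : Int) else 0) := by
          rw [ih, pvDiagIndicator bases hnd x]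
      _ = ((x :: t).map (fun p => if p.1 = p.2 ∧ p.1 ∈ bases then (1 : Int) else 0)).sum := by
          simp; ring

-- ===== VERDICT (by name: the statement is the Claim_ definition above) =====
theorem pairwise_diff_spec : Claim_equal_pairwise_diff := by
  intro seq1 seq2 _
  unfold Spec_pairwise_diff pairwise_diff pairwise_diff_alt
  set vb : PySem.Set Char := PySem.Set.ofList ['A', 'C', 'T', 'G'] with hvb
  set l := List.zip seq1.toList seq2.toList with hl
  dsimp only
  rw [PySem.Dict.foldl_insert_getD_add_one_eq_counter]
  rw [pvFoldA_eq, PySem.Dict.items_counter]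
  -- matches: getD on a counter is List.count
  have hm : ("ACGT".toList.map (fun b => (PySem.Dict.counter l).getD (b, b) 0)).sum
      = ("ACGT".toList.map (fun b => (l.count ((b, b) : Char × Char) : Int))).sum := by
    congr 1
    exact List.map_congr_left (fun b _ => PySem.Dict.getD_counter l (b, b))
  rw [hm, pvDiag_sum "ACGT".toList (by decide) l]
  -- valid_sites: filter through the map, then a multiplicity-weighted sum over the distinct pairs
  rw [List.filter_map, List.map_map]
  have hvsum : ((((PySem.Set.ofList l).filter
        ((fun kn => decide (kn.1.1 ∈ vb) && decide (kn.1.2 ∈ vb)) ∘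
          fun k => (k, (l.count k : Int)))).map ((·.2) ∘ fun k => (k, (l.count k : Int))))).sum
      = (l.map (fun p => if p.1 ∈ vb ∧ p.2 ∈ vb then (1 : Int) else 0)).sum := by
    rw [pvSum_filter]
    have e : (PySem.Set.ofList l).map
          (fun k => if ((fun kn => decide (kn.1.1 ∈ vb) && decide (kn.1.2 ∈ vb)) ∘
              fun k => (k, (l.count k : Int))) k
            then ((·.2) ∘ fun k => (k, (l.count k : Int))) k else 0)
        = (PySem.Set.ofList l).map
          (fun k => (l.count k : Int) * (if k.1 ∈ vb ∧ k.2 ∈ vb then (1 : Int) else 0)) := by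
      apply List.map_congr_left; intro k _
      by_cases hk : k.1 ∈ vb ∧ k.2 ∈ vb
      · simp [hk]
      · rcases Decidable.not_and_iff_not_or_not.mp hk with h1 | h1 <;> simp [h1]
    rw [e, pvCount_weight l (PySem.Set.ofList l) (PySem.Set.nodup_ofList l)
      (fun y hy => (PySem.Set.mem_ofList _ _).mpr hy)
      (fun k => if k.1 ∈ vb ∧ k.2 ∈ vb then (1 : Int) else 0)]
  rw [hvsum]
  -- pointwise: [valid] = [valid ∧ diff] + [diagonal over ACGT]
  have hpoint : ∀ p : Char × Char,
      (if p.1 ∈ vb ∧ p.2 ∈ vb then (1 : Int) else 0)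
      = (if p.1 ∈ vb ∧ p.2 ∈ vb ∧ p.1 ≠ p.2 then (1 : Int) else 0)
        + (if p.1 = p.2 ∧ p.1 ∈ "ACGT".toList then (1 : Int) else 0) := by
    intro p
    have hmem : p.1 ∈ vb ↔ p.1 ∈ "ACGT".toList := by
      have h1 : ("ACGT".toList) = ['A', 'C', 'G', 'T'] := rfl
      rw [hvb, h1, PySem.Set.mem_ofList]
      simp only [List.mem_cons, List.not_mem_nil]
      tauto
    by_cases hv : p.1 ∈ vb ∧ p.2 ∈ vb
    · by_cases hne : p.1 = p.2
      · have hd : p.1 = p.2 ∧ p.1 ∈ "ACGT".toList := ⟨hne, hmem.mp hv.1⟩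
        have hnd2 : ¬(p.1 ∈ vb ∧ p.2 ∈ vb ∧ p.1 ≠ p.2) := fun ⟨_, _, h⟩ => h hne
        rw [if_pos hv, if_neg hnd2, if_pos hd]; norm_num
      · have hd : ¬(p.1 = p.2 ∧ p.1 ∈ "ACGT".toList) := fun ⟨h, _⟩ => hne h
        rw [if_pos hv, if_pos ⟨hv.1, hv.2, hne⟩, if_neg hd]; norm_num
    · have h1 : ¬(p.1 ∈ vb ∧ p.2 ∈ vb ∧ p.1 ≠ p.2) := fun ⟨a, b, _⟩ => hv ⟨a, b⟩
      have hd : ¬(p.1 = p.2 ∧ p.1 ∈ "ACGT".toList) := by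
        rintro ⟨he, hb⟩
        exact hv ⟨hmem.mpr hb, he ▸ hmem.mpr hb⟩
      rw [if_neg hv, if_neg h1, if_neg hd]; norm_num
  have hsum : (l.map (fun p => if p.1 ∈ vb ∧ p.2 ∈ vb then (1 : Int) else 0)).sum
      = (l.map (fun p => if p.1 ∈ vb ∧ p.2 ∈ vb ∧ p.1 ≠ p.2 then (1 : Int) else 0)).sum
        + (l.map (fun p => if p.1 = p.2 ∧ p.1 ∈ "ACGT".toList then (1 : Int) else 0)).sum := by
    rw [← List.sum_map_add]
    congr 1
    exact List.map_congr_left (fun p _ => hpoint p)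
  rw [Prod.ext_iff]
  dsimp only
  exact ⟨by linarith [hsum], by ring⟩
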